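-- pv_equiv track=rewrite | github.com/mepavan7/python-practice | reversepattern/reverseeveryblockofk.py | reverse_every_block_k
-- ===== SOURCE A (Python) =====
-- def reverse_every_block_k(s, k):
--     count = 0
--     rev = ''
--     for i in range(0, len(s), k):
--         t = s[i:i+k]
--         count += 1
--         if (count % 3 == 0):
--             rev += t[::-1]
--         else:
--             rev += t
--     return rev
-- ===== SOURCE B (Python) =====
-- def reverse_every_block_k(s, k):
--     parts = []
--     for i in range(0, len(s), 3 * k):
--         parts.append(s[i:i + 2 * k])
--         parts.append(s[i + 2 * k:i + 3 * k][::-1])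
--     return ''.join(parts)
-- ===== Notes on version B (the rewrite author's own statement) =====
-- stated objective: alternative
-- what changed: B walks the string one triple of blocks at a time with step 3*k, emitting the first 2k characters unchanged and the next k reversed, collecting parts in a list joined once; this removes A's per-block counter, the %3 test and the repeated string concatenation.
import Mathlib
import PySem

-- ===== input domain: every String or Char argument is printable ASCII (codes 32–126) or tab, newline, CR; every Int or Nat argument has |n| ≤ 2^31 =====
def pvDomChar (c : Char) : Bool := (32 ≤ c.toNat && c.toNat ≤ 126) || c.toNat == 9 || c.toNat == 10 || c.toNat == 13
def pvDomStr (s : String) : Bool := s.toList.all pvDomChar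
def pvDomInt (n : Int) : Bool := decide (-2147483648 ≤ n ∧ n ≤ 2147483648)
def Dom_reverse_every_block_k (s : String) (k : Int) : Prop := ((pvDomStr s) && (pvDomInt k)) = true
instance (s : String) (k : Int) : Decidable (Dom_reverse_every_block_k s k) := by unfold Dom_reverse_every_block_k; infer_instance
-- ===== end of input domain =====

-- B processes a triple of blocks per loop iteration (step 3*k, two blocks kept, one reversed)
-- instead of A's per-block counter with a %3 test; same O(n) cost, different decomposition.

-- ===== PORT A =====
-- A: loop over range(0, len(s), k) with count; every third block is reversed; rev accumulated
-- by string concatenation (ported on the character list; String.ofList at the end).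
def reverse_every_block_k (s : String) (k : Int) : String :=
  let cs := s.toList
  let st :=
    (PySem.List.pyRange 0 (PySem.Str.len s) k).foldl
      (fun (st : Int × List Char) i =>
        let t := PySem.List.slice cs (some i) (some (i + k))
        let count := st.1 + 1
        if PySem.Int.mod count 3 = 0 then
          (count, st.2 ++ ((PySem.List.slice? t none none (-1)).getD []))
        else
          (count, st.2 ++ t))
      (0, [])
  String.ofList st.2

-- ===== PORT B =====
-- B: loop over range(0, len(s), 3*k); each iteration appends s[i:i+2k] and s[i+2k:i+3k][::-1]
-- to the parts list; ''.join(parts) at the end.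
def reverse_every_block_k_alt (s : String) (k : Int) : String :=
  let cs := s.toList
  let parts :=
    (PySem.List.pyRange 0 (PySem.Str.len s) (3 * k)).foldl
      (fun (acc : List (List Char)) i =>
        acc ++ [PySem.List.slice cs (some i) (some (i + 2 * k)),
                (PySem.List.slice? (PySem.List.slice cs (some (i + 2 * k)) (some (i + 3 * k)))
                    none none (-1)).getD []])
      []
  String.ofList parts.flatten

-- ===== PRECONDITION & SPEC =====
-- Pre_ excludes exactly k = 0, where Python's range(0, len(s), 0) raises ValueError (in both A and B).
def Pre_reverse_every_block_k (s : String) (k : Int) : Prop := k ≠ 0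
instance (s : String) (k : Int) : Decidable (Pre_reverse_every_block_k s k) := by
  unfold Pre_reverse_every_block_k; infer_instance

def pvWitness_reverse_every_block_k : String × Int := ("abcdefgh", 2)

def Spec_reverse_every_block_k (s : String) (k : Int) (out : String) : Prop := out = reverse_every_block_k_alt s k
instance (s : String) (k : Int) (out : String) : Decidable (Spec_reverse_every_block_k s k out) := by unfold Spec_reverse_every_block_k; infer_instance

-- ===== CLAIM (what is proved, stated in full; the proofs are below) =====
def Claim_equal_reverse_every_block_k : Prop := ∀ (s : String) (k : Int), Dom_reverse_every_block_k s k → Pre_reverse_every_block_k s k → Spec_reverse_every_block_k s k (reverse_every_block_k s k)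

-- ===== LEMMAS AND PROOFS =====

-- range with a positive step: structural cons / nil forms
theorem pyRange_pos_eq_nil (a b s : Int) (hs : 0 < s) (h : b ≤ a) :
    PySem.List.pyRange a b s = [] := by
  rw [PySem.List.pyRange_of_pos a b hs]
  simp [show ¬ a < b by omega]

theorem pyRange_pos_cons (a b s : Int) (hs : 0 < s) (h : a < b) :
    PySem.List.pyRange a b s = a :: PySem.List.pyRange (a + s) b s := by
  rw [PySem.List.pyRange_of_pos a b hs, PySem.List.pyRange_of_pos (a + s) b hs]
  have hcnt : (if a < b then ((b - a + s - 1) / s).toNat else 0)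
      = (if a + s < b then ((b - (a + s) + s - 1) / s).toNat else 0) + 1 := by
    rw [if_pos h]
    by_cases h2 : a + s < b
    · rw [if_pos h2]
      have he : b - a + s - 1 = (b - (a + s) + s - 1) + 1 * s := by ring
      rw [he, Int.add_mul_ediv_right _ _ (by omega : s ≠ 0)]
      have h0 : 0 ≤ (b - (a + s) + s - 1) / s :=
        Int.ediv_nonneg (by omega) (by omega)
      omega
    · rw [if_neg h2]
      have h1 : (1 : Int) ≤ (b - a + s - 1) / s := by
        rw [Int.le_ediv_iff_mul_le hs]; omega
      have h2' : (b - a + s - 1) / s < 2 := by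
        rw [Int.ediv_lt_iff_lt_mul hs]; omega
      omega
  rw [hcnt, List.range_succ_eq_map]
  simp only [List.map_cons, List.map_map]
  congr 1
  · simp
  · apply List.map_congr_left
    intro x _
    simp only [Function.comp_apply]
    push_cast
    ring

theorem pyRange_neg_eq_nil (a b s : Int) (hs : s < 0) (h : a ≤ b) :
    PySem.List.pyRange a b s = [] := by
  simp only [PySem.List.pyRange]
  rw [if_neg (by omega : ¬ s = 0)]
  simp [show ¬ 0 < s by omega, show ¬ b < a by omega]

-- slices of a concatenation point: xs[a:c] = xs[a:b] ++ xs[b:c] for 0 ≤ a ≤ b ≤ c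
theorem slice_split {α : Type} (xs : List α) (a b c : Int)
    (ha : 0 ≤ a) (hab : a ≤ b) (hbc : b ≤ c) :
    PySem.List.slice xs (some a) (some c)
      = PySem.List.slice xs (some a) (some b) ++ PySem.List.slice xs (some b) (some c) := by
  rw [PySem.List.slice_toNat xs ha (by omega), PySem.List.slice_toNat xs ha (by omega),
      PySem.List.slice_toNat xs (by omega) (by omega)]
  have h1 : c.toNat - a.toNat = (b.toNat - a.toNat) + (c.toNat - b.toNat) := by omega
  rw [h1, List.take_add]
  congr 1
  rw [List.drop_drop]
  congr 2
  omega

-- past-the-end slices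
theorem slice_past_end {α : Type} (xs : List α) (a b : Int)
    (ha : (xs.length : Int) ≤ a) (h0 : 0 ≤ a) :
    PySem.List.slice xs (some a) (some b) = [] := by
  have hl : (PySem.List.slice xs (some a) (some b)).length = 0 := by
    rw [PySem.List.length_slice]
    simp only [PySem.List.clampIdx]
    split_ifs <;> omega
  exact List.eq_nil_of_length_eq_zero hl

theorem slice_clamp_stop {α : Type} (xs : List α) (a b b' : Int)
    (h0 : 0 ≤ a) (hb : (xs.length : Int) ≤ b) (hb' : b ≤ b') :
    PySem.List.slice xs (some a) (some b') = PySem.List.slice xs (some a) (some b) := by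
  rw [PySem.List.slice_toNat xs h0 (by omega), PySem.List.slice_toNat xs h0 (by omega)]
  rw [List.take_of_length_le (by simp; omega), List.take_of_length_le (by simp; omega)]

-- A's loop body / B's per-triple contribution, named for the main induction
def pvStepA (cs : List Char) (k : Int) (st : Int × List Char) (i : Int) : Int × List Char :=
  let t := PySem.List.slice cs (some i) (some (i + k))
  let count := st.1 + 1
  if PySem.Int.mod count 3 = 0 then
    (count, st.2 ++ ((PySem.List.slice? t none none (-1)).getD []))
  else
    (count, st.2 ++ t)

def pvTriple (cs : List Char) (k : Int) (i : Int) : List Char :=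
  PySem.List.slice cs (some i) (some (i + 2 * k))
    ++ (PySem.List.slice cs (some (i + 2 * k)) (some (i + 3 * k))).reverse

theorem pvStepA_keep (cs : List Char) (k : Int) (st : Int × List Char) (i : Int)
    (h : PySem.Int.mod (st.1 + 1) 3 ≠ 0) :
    pvStepA cs k st i = (st.1 + 1, st.2 ++ PySem.List.slice cs (some i) (some (i + k))) := by
  simp only [pvStepA]
  rw [if_neg h]

theorem pvStepA_rev (cs : List Char) (k : Int) (st : Int × List Char) (i : Int)
    (h : PySem.Int.mod (st.1 + 1) 3 = 0) :
    pvStepA cs k st i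
      = (st.1 + 1, st.2 ++ (PySem.List.slice cs (some i) (some (i + k))).reverse) := by
  simp only [pvStepA]
  rw [if_pos h, PySem.List.slice?_none_none_neg_one]
  rfl

-- main induction: A's fold from index i with count 3*j produces B's flatMap of triples
theorem pvMain (cs : List Char) (k : Int) (hk : 0 < k) :
    ∀ (m : Nat) (i j : Int) (acc : List Char), 0 ≤ i → ((cs.length : Int) - i).toNat ≤ m →
    ((PySem.List.pyRange i (cs.length : Int) k).foldl (pvStepA cs k) (3 * j, acc)).2
      = acc ++ (PySem.List.pyRange i (cs.length : Int) (3 * k)).flatMap (pvTriple cs k) := by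
  intro m
  induction m with
  | zero =>
    intro i j acc hi hm
    have hin : (cs.length : Int) ≤ i := by omega
    rw [pyRange_pos_eq_nil _ _ _ hk hin, pyRange_pos_eq_nil _ _ _ (by omega) hin]
    simp
  | succ m ih =>
    intro i j acc hi hm
    by_cases hin : (cs.length : Int) ≤ i
    · rw [pyRange_pos_eq_nil _ _ _ hk hin, pyRange_pos_eq_nil _ _ _ (by omega) hin]
      simp
    · push_neg at hin
      have h3 : PySem.List.pyRange i (cs.length : Int) (3 * k)
          = i :: PySem.List.pyRange (i + 3 * k) (cs.length : Int) (3 * k) :=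
        pyRange_pos_cons _ _ _ (by omega) hin
      have hmod1 : PySem.Int.mod (3 * j + 1) 3 ≠ 0 := by
        rw [PySem.Int.mod_eq_emod_of_pos (by omega : (0:Int) < 3)]; omega
      have hmod2 : PySem.Int.mod (3 * j + 1 + 1) 3 ≠ 0 := by
        rw [PySem.Int.mod_eq_emod_of_pos (by omega : (0:Int) < 3)]; omega
      have hmod3 : PySem.Int.mod (3 * j + 1 + 1 + 1) 3 = 0 := by
        rw [PySem.Int.mod_eq_emod_of_pos (by omega : (0:Int) < 3)]; omega
      by_cases h2k : i + 2 * k < (cs.length : Int)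
      · -- full triple: three cons steps, then the IH at i + 3*k with count 3*(j+1)
        rw [pyRange_pos_cons i _ _ hk hin,
            pyRange_pos_cons (i + k) _ _ hk (by omega),
            pyRange_pos_cons (i + k + k) _ _ hk (by omega)]
        simp only [List.foldl_cons]
        rw [pvStepA_keep cs k (3 * j, acc) i hmod1,
            pvStepA_keep cs k _ (i + k) hmod2,
            pvStepA_rev cs k _ (i + k + k) hmod3]
        have hj1 : (3 * j + 1 + 1 + 1 : Int) = 3 * (j + 1) := by ring
        simp only []
        rw [hj1, show i + k + k + k = i + 3 * k from by ring]
        rw [ih (i + 3 * k) (j + 1) _ (by omega) (by omega)]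
        rw [h3, List.flatMap_cons]
        simp only [pvTriple]
        rw [show i + k + k = i + 2 * k from by ring,
            slice_split cs i (i + k) (i + 2 * k) hi (by omega) (by omega)]
        simp [List.append_assoc]
      · -- tail: fewer than three blocks remain; the reversed third slice is empty
        push_neg at h2k
        have htail3 : PySem.List.pyRange (i + 3 * k) (cs.length : Int) (3 * k) = [] :=
          pyRange_pos_eq_nil _ _ _ (by omega) (by omega)
        have hrev : PySem.List.slice cs (some (i + 2 * k)) (some (i + 3 * k)) = [] :=
          slice_past_end cs _ _ (by omega) (by omega)
        rw [h3, List.flatMap_cons, htail3, List.flatMap_nil, List.append_nil]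
        simp only [pvTriple, hrev, List.reverse_nil, List.append_nil]
        by_cases hk1 : i + k < (cs.length : Int)
        · -- two blocks
          rw [pyRange_pos_cons i _ _ hk hin,
              pyRange_pos_cons (i + k) _ _ hk hk1,
              pyRange_pos_eq_nil (i + k + k) _ _ hk (by omega)]
          simp only [List.foldl_cons, List.foldl_nil]
          rw [pvStepA_keep cs k (3 * j, acc) i hmod1,
              pvStepA_keep cs k _ (i + k) hmod2]
          rw [slice_split cs i (i + k) (i + 2 * k) hi (by omega) (by omega)]
          rw [show PySem.List.slice cs (some (i + k)) (some (i + 2 * k))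
                = PySem.List.slice cs (some (i + k)) (some (i + k + k)) by congr 2; ring]
          simp
        · -- one block
          push_neg at hk1
          rw [pyRange_pos_cons i _ _ hk hin,
              pyRange_pos_eq_nil (i + k) _ _ hk (by omega)]
          simp only [List.foldl_cons, List.foldl_nil]
          rw [pvStepA_keep cs k (3 * j, acc) i hmod1]
          rw [slice_clamp_stop cs i (i + k) (i + 2 * k) hi (by omega) (by omega)]

-- flattening B's parts list is the flatMap of triples
theorem pvFlattenB (cs : List Char) (k : Int) (l : List Int) :
    (l.foldl (fun (acc : List (List Char)) i =>
        acc ++ [PySem.List.slice cs (some i) (some (i + 2 * k)),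
                (PySem.List.slice? (PySem.List.slice cs (some (i + 2 * k)) (some (i + 3 * k)))
                    none none (-1)).getD []]) []).flatten
      = l.flatMap (pvTriple cs k) := by
  rw [PySem.List.foldl_append_eq_flatMap]
  induction l with
  | nil => simp
  | cons x t ih =>
    simp only [List.flatMap_cons, List.flatten_append, List.nil_append] at *
    rw [ih]
    simp [pvTriple, PySem.List.slice?_none_none_neg_one]

-- ===== VERDICT (by name: the statement is the Claim_ definition above) =====
theorem reverse_every_block_k_spec : Claim_equal_reverse_every_block_k := by
  intro s k _ hk
  unfold Spec_reverse_every_block_k reverse_every_block_k reverse_every_block_k_alt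
  simp only [PySem.Str.len_eq]
  rcases lt_or_gt_of_ne hk with hneg | hpos
  · rw [pyRange_neg_eq_nil 0 _ k hneg (by positivity),
        pyRange_neg_eq_nil 0 _ (3 * k) (by omega) (by positivity)]
    simp
  · rw [pvFlattenB s.toList k]
    have hmain := pvMain s.toList k hpos ((s.toList.length : Int)).toNat 0 0 [] (by omega) (by omega)
    rw [show (3 : Int) * 0 = 0 by ring] at hmain
    rw [show ((PySem.List.pyRange 0 (s.toList.length : Int) k).foldl
          (fun (st : Int × List Char) i =>
            let t := PySem.List.slice s.toList (some i) (some (i + k))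
            let count := st.1 + 1
            if PySem.Int.mod count 3 = 0 then
              (count, st.2 ++ ((PySem.List.slice? t none none (-1)).getD []))
            else
              (count, st.2 ++ t)) (0, []))
        = ((PySem.List.pyRange 0 (s.toList.length : Int) k).foldl (pvStepA s.toList k) (0, [])) from rfl]
    rw [hmain]
    simp
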